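-- pv_equiv track=rewrite | github.com/tarkadaal/aoc2018 | day3/pt1.py | calculate_coords
-- ===== SOURCE A (Python) =====
-- def calculate_coords(xpos, ypos, xlength, ylength, coord_set):
--
--     collision_count = 0
--
--     for j in range(1, ylength+1):
--         for i in range(1, xlength+1):
--             coord = (xpos+i, ypos+j)
--             if coord in coord_set:
--                 collision_count += 1;
--             else:
--                 coord_set.add(coord)
--
--     return collision_count
-- ===== SOURCE B (Python) =====
-- def calculate_coords(xpos, ypos, xlength, ylength, coord_set):
--     # Count collisions by scanning the EXISTING set once with arithmetic bounds
--     # checks (is the point inside the rectangle?) -- no grid enumeration at all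
--     # for the count; then mark the rectangle's cells in place.
--     collision_count = 0
--     for (x, y) in coord_set:
--         if xpos < x <= xpos + xlength and ypos < y <= ypos + ylength:
--             collision_count += 1
--     coord_set.update((xpos + i, ypos + j)
--                      for j in range(1, ylength + 1)
--                      for i in range(1, xlength + 1))
--     return collision_count
-- ===== Notes on version B (the rewrite author's own statement) =====
-- stated objective: alternative
-- what changed: Instead of enumerating the rectangle's cells and testing each against the set, B scans the existing coord_set once and counts points whose coordinates fall inside the rectangle bounds (O(|coord_set|) for the count instead of O(xlength*ylength)); the in-place marking of the rectangle cells is done afterwards in bulk.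
import Mathlib
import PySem

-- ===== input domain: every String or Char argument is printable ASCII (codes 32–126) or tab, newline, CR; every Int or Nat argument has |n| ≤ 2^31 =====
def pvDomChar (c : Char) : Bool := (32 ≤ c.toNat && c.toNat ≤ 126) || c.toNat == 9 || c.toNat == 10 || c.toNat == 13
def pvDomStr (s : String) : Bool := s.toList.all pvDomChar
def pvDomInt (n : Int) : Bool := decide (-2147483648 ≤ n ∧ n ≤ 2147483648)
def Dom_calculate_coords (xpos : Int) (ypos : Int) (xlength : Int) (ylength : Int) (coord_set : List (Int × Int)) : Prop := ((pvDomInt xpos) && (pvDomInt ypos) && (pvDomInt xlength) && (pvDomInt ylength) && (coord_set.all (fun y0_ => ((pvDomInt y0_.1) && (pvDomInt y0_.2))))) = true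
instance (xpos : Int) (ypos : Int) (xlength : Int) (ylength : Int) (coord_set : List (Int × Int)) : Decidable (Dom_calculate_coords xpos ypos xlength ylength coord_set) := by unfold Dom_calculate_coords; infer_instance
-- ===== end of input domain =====

-- B counts collisions by scanning the existing coord_set once with arithmetic bounds checks
-- (is the point inside the rectangle?) instead of A's per-cell grid enumeration; objective:
-- alternative. Both Pythons mutate coord_set identically; the theorem is about the return value.


-- ===== PORT A =====
-- for j in range(1, ylength+1): for i in range(1, xlength+1): check-and-add each cell
def calculate_coords (xpos : Int) (ypos : Int) (xlength : Int) (ylength : Int) (coord_set : List (Int × Int)) : Int :=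
  (((PySem.List.pyRange 1 (ylength + 1) 1).foldl (fun (st : Int × PySem.Set (Int × Int)) j =>
      (PySem.List.pyRange 1 (xlength + 1) 1).foldl (fun st i =>
        let coord := (xpos + i, ypos + j)
        if PySem.Set.contains st.2 coord then (st.1 + 1, st.2)
        else (st.1, PySem.Set.add st.2 coord)) st)
    ((0 : Int), (coord_set : PySem.Set (Int × Int))))).1

-- ===== PORT B =====
-- for (x, y) in coord_set: bump the counter when the point lies inside the rectangle.
-- (Iterating the Python set = iterating its distinct elements, PySem.Set.ofList; the
-- trailing coord_set.update is in-place mutation, not part of the return value.)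
def calculate_coords_alt (xpos : Int) (ypos : Int) (xlength : Int) (ylength : Int) (coord_set : List (Int × Int)) : Int :=
  (PySem.Set.ofList coord_set).foldl (fun (collision_count : Int) c =>
    if xpos < c.1 ∧ c.1 ≤ xpos + xlength ∧ ypos < c.2 ∧ c.2 ≤ ypos + ylength then
      collision_count + 1
    else collision_count) 0

-- ===== PRECONDITION & SPEC =====
def Spec_calculate_coords (xpos : Int) (ypos : Int) (xlength : Int) (ylength : Int) (coord_set : List (Int × Int)) (out : Int) : Prop := out = calculate_coords_alt xpos ypos xlength ylength coord_set
instance (xpos : Int) (ypos : Int) (xlength : Int) (ylength : Int) (coord_set : List (Int × Int)) (out : Int) : Decidable (Spec_calculate_coords xpos ypos xlength ylength coord_set out) := by unfold Spec_calculate_coords; infer_instance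

-- ===== CLAIM (what is proved, stated in full; the proofs are below) =====
def Claim_equal_calculate_coords : Prop := ∀ (xpos : Int) (ypos : Int) (xlength : Int) (ylength : Int) (coord_set : List (Int × Int)), Dom_calculate_coords xpos ypos xlength ylength coord_set → Spec_calculate_coords xpos ypos xlength ylength coord_set (calculate_coords xpos ypos xlength ylength coord_set)

-- ===== LEMMAS AND PROOFS =====

-- A's check-and-add loop over a duplicate-free cell list counts membership in the INITIAL set.
theorem pv_loop_count (cells : List (Int × Int)) (hnd : cells.Nodup) :
    ∀ (c : Int) (s : PySem.Set (Int × Int)),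
      (cells.foldl (fun st x =>
        if PySem.Set.contains st.2 x then (st.1 + 1, st.2)
        else (st.1, PySem.Set.add st.2 x)) (c, s)).1
      = c + (cells.countP (fun x => PySem.Set.contains s x) : Int) := by
  induction cells with
  | nil => intro c s; simp
  | cons x t ih =>
    intro c s
    have hx : x ∉ t := (List.nodup_cons.mp hnd).1
    have ht : t.Nodup := (List.nodup_cons.mp hnd).2
    by_cases h : PySem.Set.contains s x
    · simp only [List.foldl_cons, h, if_pos, List.countP_cons, ih ht]
      simp; ring
    · have hsame : t.countP (fun y => PySem.Set.contains (PySem.Set.add s x) y)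
          = t.countP (fun y => PySem.Set.contains s y) := by
        apply List.countP_congr
        intro y hy
        have hne : y ≠ x := fun e => hx (e ▸ hy)
        simp only [PySem.Set.add, PySem.Set.contains] at h ⊢
        rw [if_neg h]
        simp [hne]
      simp only [List.foldl_cons, h, if_neg, Bool.false_eq_true, not_false_iff,
        List.countP_cons, ih ht, hsame]
      simp

-- B's counting loop is a countP.
theorem pv_fold_countP (p : (Int × Int) → Prop) [DecidablePred p] (l : List (Int × Int)) :
    ∀ (c : Int), (l.foldl (fun (cc : Int) x => if p x then cc + 1 else cc) c)
      = c + (l.countP (fun x => decide (p x)) : Int) := by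
  induction l with
  | nil => intro c; simp
  | cons x t ih =>
    intro c
    by_cases h : p x <;> simp [h, ih] <;> try ring

-- the cell list is duplicate-free (distinct (i, j) give distinct coordinates)
theorem pv_cells_nodup (xpos ypos xlength ylength : Int) :
    ((PySem.List.pyRange 1 (ylength + 1) 1).flatMap (fun j =>
      (PySem.List.pyRange 1 (xlength + 1) 1).map (fun i => (xpos + i, ypos + j)))).Nodup := by
  refine List.nodup_flatMap.mpr ⟨?_, ?_⟩
  · intro j _
    refine List.Nodup.map ?_ (PySem.List.nodup_pyRange_one 1 (xlength + 1))
    intro a b h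
    have := congrArg Prod.fst h
    simpa using this
  · have hp := PySem.List.pairwise_lt_pyRange_one 1 (ylength + 1)
    refine hp.imp ?_
    intro a b hab p hpa hpb
    simp only [List.mem_map] at hpa hpb
    obtain ⟨i, _, rfl⟩ := hpa
    obtain ⟨i', _, h2⟩ := hpb
    have := congrArg Prod.snd h2
    simp at this
    omega

-- a point is a rectangle cell iff its coordinates lie strictly above (xpos, ypos), within the lengths
theorem pv_mem_cells (xpos ypos xlength ylength : Int) (x : Int × Int) :
    x ∈ ((PySem.List.pyRange 1 (ylength + 1) 1).flatMap (fun j =>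
      (PySem.List.pyRange 1 (xlength + 1) 1).map (fun i => (xpos + i, ypos + j))))
    ↔ (xpos < x.1 ∧ x.1 ≤ xpos + xlength ∧ ypos < x.2 ∧ x.2 ≤ ypos + ylength) := by
  simp only [List.mem_flatMap, List.mem_map, PySem.List.mem_pyRange_one]
  constructor
  · rintro ⟨j, hj, i, hi, rfl⟩; simp; omega
  · rintro ⟨h1, h2, h3, h4⟩
    exact ⟨x.2 - ypos, by omega, x.1 - xpos, by omega, by simp⟩

-- ===== VERDICT (by name: the statement is the Claim_ definition above) =====
theorem calculate_coords_spec : Claim_equal_calculate_coords := by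
  intro xpos ypos xlength ylength coord_set _
  unfold Spec_calculate_coords calculate_coords calculate_coords_alt
  set cells := ((PySem.List.pyRange 1 (ylength + 1) 1).flatMap (fun j =>
      (PySem.List.pyRange 1 (xlength + 1) 1).map (fun i => (xpos + i, ypos + j)))) with hcells
  have hnd : cells.Nodup := pv_cells_nodup xpos ypos xlength ylength
  have hfold : cells.foldl (fun (st : Int × PySem.Set (Int × Int)) x =>
        if PySem.Set.contains st.2 x then (st.1 + 1, st.2)
        else (st.1, PySem.Set.add st.2 x)) ((0 : Int), (coord_set : PySem.Set (Int × Int)))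
      = ((PySem.List.pyRange 1 (ylength + 1) 1).foldl (fun (st : Int × PySem.Set (Int × Int)) j =>
      (PySem.List.pyRange 1 (xlength + 1) 1).foldl (fun st i =>
        let coord := (xpos + i, ypos + j)
        if PySem.Set.contains st.2 coord then (st.1 + 1, st.2)
        else (st.1, PySem.Set.add st.2 coord)) st)
    ((0 : Int), (coord_set : PySem.Set (Int × Int)))) := by
    rw [hcells, List.foldl_flatMap]
    simp only [List.foldl_map]
  rw [← hfold, pv_loop_count cells hnd 0 coord_set,
    pv_fold_countP (fun c => xpos < c.1 ∧ c.1 ≤ xpos + xlength ∧ ypos < c.2 ∧ c.2 ≤ ypos + ylength)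
      (PySem.Set.ofList coord_set) 0]
  simp only [zero_add, Int.natCast_inj]
  rw [List.countP_eq_length_filter, List.countP_eq_length_filter]
  have hperm : List.Perm
      (cells.filter (fun x => PySem.Set.contains (coord_set : PySem.Set (Int × Int)) x))
      ((PySem.Set.ofList coord_set).filter
          (fun c => decide (xpos < c.1 ∧ c.1 ≤ xpos + xlength ∧ ypos < c.2 ∧ c.2 ≤ ypos + ylength))) := by
    refine (List.perm_ext_iff_of_nodup (hnd.filter _) ((PySem.Set.nodup_ofList coord_set).filter _)).mpr ?_
    intro a
    simp only [List.mem_filter, PySem.Set.mem_ofList, decide_eq_true_eq]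
    rw [pv_mem_cells]
    constructor
    · rintro ⟨hrect, hmem⟩
      exact ⟨by simpa [PySem.Set.contains_iff] using hmem, hrect⟩
    · rintro ⟨hmem, hrect⟩
      exact ⟨hrect, by simpa [PySem.Set.contains_iff] using hmem⟩
  exact hperm.length_eq
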